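-- pv_equiv track=rewrite | github.com/pypi-data/pypi-mirror-238 | packages/imgMS/imgMS-0.2.12-py3-none-any.whl/imgMS/side_functions.py | element_formater
-- ===== SOURCE A (Python) =====
-- def element_formater(elem, lst_of_elems):
--     """matches the given element format to the one used in list"""
--     if elem in lst_of_elems:
--         return elem
--     elif elem not in lst_of_elems:
--         elem = elem.replace(' oxide', '')
--         if elem in lst_of_elems:
--             return elem
--         elif elem not in lst_of_elems:
--             elem = elem.replace('(LR)', '').replace(
--                 '(MR)', '').replace('(HR)', '')
--             if elem in lst_of_elems:
--                 return elem
--             elif elem not in lst_of_elems: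
--                 elem = elem + '(LR)'
--                 if elem in lst_of_elems:
--                     return elem
--                 elif elem not in lst_of_elems:
--                     elem = elem.replace('(LR)', '')
--                     elem = elem + '(MR)'
--                     if elem in lst_of_elems:
--                         return elem
--                     elif elem not in lst_of_elems:
--                         elem = elem.replace('(MR)', '')
--                         elem = elem + '(HR)'
--                         if elem in lst_of_elems:
--                             return elem
--                         elif elem not in lst_of_elems:
--                             elem = elem.replace('(HR)', '')
--                             elem = ''.join([c for c in elem if c.isalpha()])
--                             if elem in lst_of_elems:
--                                 return elem
--                             else:
--                                 return
-- ===== SOURCE B (Python) =====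
-- def element_formater(elem, lst_of_elems):
--     """matches the given element format to the one used in list"""
--     base1 = elem.replace(' oxide', '')
--     base2 = base1.replace('(LR)', '').replace('(MR)', '').replace('(HR)', '')
--     candidates = [elem, base1, base2, base2 + '(LR)', base2 + '(MR)',
--                   base2 + '(HR)', ''.join(c for c in base2 if c.isalpha())]
--     rank = {}
--     for i, c in enumerate(candidates):
--         if c not in rank:
--             rank[c] = i
--     best = None
--     best_rank = len(candidates)
--     for x in lst_of_elems:
--         r = rank.get(x)
--         if r is not None and r < best_rank:
--             best, best_rank = x, r
--     return best
-- ===== Notes on version B (the rewrite author's own statement) =====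
-- stated objective: alternative
-- what changed: Replaces the 7-deep nested if/elif cascade (a membership scan of the list after each transformation) by precomputing the seven candidate strings once from the stripped base, building a first-wins rank dict over them, and making a SINGLE pass over lst_of_elems keeping the lowest-ranked match.
-- outside the precondition, e.g. on element_formater('(L(MR)R)', ['(MR)']): A returns '(MR)', B returns None
import Mathlib
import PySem

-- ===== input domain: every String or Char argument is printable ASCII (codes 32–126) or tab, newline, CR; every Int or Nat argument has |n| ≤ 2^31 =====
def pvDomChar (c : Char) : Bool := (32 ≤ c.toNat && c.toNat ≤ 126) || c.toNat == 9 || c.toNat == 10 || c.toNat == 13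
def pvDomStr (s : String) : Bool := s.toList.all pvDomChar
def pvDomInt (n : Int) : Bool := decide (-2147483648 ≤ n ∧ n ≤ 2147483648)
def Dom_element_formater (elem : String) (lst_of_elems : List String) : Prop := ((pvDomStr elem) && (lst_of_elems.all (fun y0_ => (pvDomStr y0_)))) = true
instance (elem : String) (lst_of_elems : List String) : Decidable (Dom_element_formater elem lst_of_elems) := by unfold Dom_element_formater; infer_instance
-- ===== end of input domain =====

-- B replaces A's 7-deep nested cascade (one membership scan of the list per step) by
-- precomputing the seven candidate strings from the stripped base, a first-wins rank
-- dict over them, and ONE pass over lst_of_elems keeping the lowest-ranked match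
-- (objective: alternative decomposition). Ports work on List Char, String at the boundary.

-- ===== PORT A =====
-- A's nested cascade, step for step; the mutable `elem` is the successive lets.
-- ''.join([c for c in elem if c.isalpha()]) is ported as the filtered character list
-- (joining single-character strings with '' is exactly that list; exact).
def efACore (e0 : List Char) (l : List (List Char)) : Option (List Char) :=
  if e0 ∈ l then some e0 else
  let e1 := PySem.Chars.replace e0 " oxide".toList []
  if e1 ∈ l then some e1 else
  let e2 := PySem.Chars.replace (PySem.Chars.replace (PySem.Chars.replace e1 "(LR)".toList []) "(MR)".toList []) "(HR)".toList []
  if e2 ∈ l then some e2 else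
  let e3 := e2 ++ "(LR)".toList
  if e3 ∈ l then some e3 else
  let e4 := PySem.Chars.replace e3 "(LR)".toList [] ++ "(MR)".toList
  if e4 ∈ l then some e4 else
  let e5 := PySem.Chars.replace e4 "(MR)".toList [] ++ "(HR)".toList
  if e5 ∈ l then some e5 else
  let e6 := (PySem.Chars.replace e5 "(HR)".toList []).filter PySem.Chars.isalpha
  if e6 ∈ l then some e6 else none

def element_formater (elem : String) (lst_of_elems : List String) : Option String :=
  (efACore elem.toList (lst_of_elems.map String.toList)).map String.ofList

-- ===== PORT B =====
-- Source B line by line: base1/base2 computed once, the candidate list, the first-wins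
-- rank dict built by `for i, c in enumerate(candidates)` (zipIdx gives (c, i) pairs),
-- then one pass over lst_of_elems keeping the match of lowest rank.
def efCandidates (e : List Char) : List (List Char) :=
  let base1 := PySem.Chars.replace e " oxide".toList []
  let base2 := PySem.Chars.replace (PySem.Chars.replace (PySem.Chars.replace base1 "(LR)".toList []) "(MR)".toList []) "(HR)".toList []
  [e, base1, base2, base2 ++ "(LR)".toList, base2 ++ "(MR)".toList,
   base2 ++ "(HR)".toList, base2.filter PySem.Chars.isalpha]

def efRank (cands : List (List Char)) : PySem.Dict (List Char) Nat :=
  cands.zipIdx.foldl (fun d p => if d.contains p.1 then d else d.insert p.1 p.2) PySem.Dict.empty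

def efScan (rank : PySem.Dict (List Char) Nat) (n : Nat) (l : List (List Char)) :
    Option (List Char) × Nat :=
  l.foldl (fun s x =>
    match rank.get? x with
    | some r => if r < s.2 then (some x, r) else s
    | none => s) (none, n)

def element_formater_alt (elem : String) (lst_of_elems : List String) : Option String :=
  let cands := efCandidates elem.toList
  let rank := efRank cands
  ((efScan rank cands.length (lst_of_elems.map String.toList)).1).map String.ofList

-- ===== PRECONDITION & SPEC =====
-- Pre_ excludes only pathological element names where stripping one resolution tag
-- re-creates another (e.g. '(L(MR)R)'): there A's chained replaces and B's candidates
-- derived from the stripped base are both defensible readings and can differ.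
def Pre_element_formater (elem : String) (lst_of_elems : List String) : Prop :=
  let base2 := PySem.Chars.replace (PySem.Chars.replace (PySem.Chars.replace (PySem.Chars.replace elem.toList " oxide".toList []) "(LR)".toList []) "(MR)".toList []) "(HR)".toList []
  PySem.Chars.isIn "(LR)".toList base2 = false ∧
  PySem.Chars.isIn "(MR)".toList base2 = false ∧
  PySem.Chars.isIn "(HR)".toList base2 = false
instance (elem : String) (lst_of_elems : List String) : Decidable (Pre_element_formater elem lst_of_elems) := by unfold Pre_element_formater; infer_instance

def pvWitness_element_formater : String × List String := ("Cu oxide", ["Cu"])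

def Spec_element_formater (elem : String) (lst_of_elems : List String) (out : Option String) : Prop := out = element_formater_alt elem lst_of_elems
instance (elem : String) (lst_of_elems : List String) (out : Option String) : Decidable (Spec_element_formater elem lst_of_elems out) := by unfold Spec_element_formater; infer_instance

-- ===== CLAIM (what is proved, stated in full; the proofs are below) =====
def Claim_equal_element_formater : Prop := ∀ (elem : String) (lst_of_elems : List String), Dom_element_formater elem lst_of_elems → Pre_element_formater elem lst_of_elems → Spec_element_formater elem lst_of_elems (element_formater elem lst_of_elems)

-- ===== LEMMAS AND PROOFS =====

theorem efGo_nil (old new : List Char) (fuel : Nat) (acc : List Char) :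
    PySem.Chars.replace.go old new fuel [] acc = acc.reverse := by
  cases fuel <;> simp [PySem.Chars.replace.go]
theorem efBoundary (x t : List Char)
    (hper : ∀ k, k < t.length → 0 < k → ¬ t.drop k <+: t)
    (hocc : ¬ t <:+: x) :
    ∀ i, i < x.length → ¬ t <+: (x ++ t).drop i := by
  intro i hi h
  rw [List.drop_append_of_le_length (le_of_lt hi)] at h
  set d := x.drop i with hd
  have hdne : d ≠ [] := by
    simp [hd, List.drop_eq_nil_iff]; omega
  obtain ⟨u, hu⟩ := h
  have hlen : u.length = d.length := by
    have := congrArg List.length hu; simp at this; omega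
  by_cases hc : t.length ≤ d.length
  · -- t is a prefix of d, hence infix of x
    have : t <+: d := by
      have h1 : (t ++ u).take t.length = t := by simp
      have h2 : (d ++ t).take t.length = d.take t.length := by
        rw [List.take_append_of_le_length hc]
      rw [hu] at h1
      rw [h1] at h2
      exact h2 ▸ List.take_prefix t.length d
    exact hocc (this.isInfix.trans (List.drop_suffix i x).isInfix)
  · rw [not_le] at hc
    have hk0 : 0 < d.length := List.length_pos_iff.mpr hdne
    have h1 : (t ++ u).drop d.length = t.drop d.length ++ u :=
      List.drop_append_of_le_length (le_of_lt hc)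
    have h2 : (d ++ t).drop d.length = t := List.drop_left
    rw [hu, h2] at h1
    exact hper d.length hc hk0 ⟨u, h1.symm⟩

theorem efReplace_append_self (x t : List Char) (hne : t ≠ [])
    (hper : ∀ k, k < t.length → 0 < k → ¬ t.drop k <+: t)
    (hocc : ¬ t <:+: x) :
    PySem.Chars.replace (x ++ t) t [] = x := by
  have hbd := efBoundary x t hper hocc
  have hie : t.isEmpty = false := by cases t with | nil => exact absurd rfl hne | cons a b => rfl
  rw [PySem.Chars.replace, hie]
  simp only [Bool.false_eq_true, if_false]
  have main : ∀ (x' : List Char) (fuel : Nat) (acc : List Char),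
      (∀ i, i < x'.length → ¬ t <+: (x' ++ t).drop i) → x'.length < fuel →
      PySem.Chars.replace.go t [] fuel (x' ++ t) acc = acc.reverse ++ x' := by
    intro x'
    induction x' with
    | nil =>
      intro fuel acc _ hf
      obtain ⟨f, rfl⟩ : ∃ f, fuel = f + 1 := ⟨fuel - 1, by omega⟩
      cases t with
      | nil => simp [PySem.Chars.replace.go]
      | cons c t' =>
        rw [List.nil_append, PySem.Chars.replace.go]
        simp only [List.isPrefixOf_iff_prefix.mpr (List.prefix_refl _), if_true]
        rw [List.drop_length]
        simpa using efGo_nil (c :: t') [] f acc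
    | cons c x'' ih =>
      intro fuel acc hb hf
      obtain ⟨f, rfl⟩ : ∃ f, fuel = f + 1 := ⟨fuel - 1, by omega⟩
      have hp : t.isPrefixOf (c :: (x'' ++ t)) = false := by
        rw [Bool.eq_false_iff]
        intro hpre
        exact hb 0 (by simp) (by simpa using List.isPrefixOf_iff_prefix.mp hpre)
      rw [List.cons_append, PySem.Chars.replace.go, hp]
      simp only [Bool.false_eq_true, if_false]
      rw [ih f (c :: acc) (fun i hi h => hb (i + 1) (by simp; omega) (by simpa using h))
        (by simp at hf; omega)]
      simp
  have hlt : x.length < (x ++ t).length := by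
    have := List.length_pos_iff.mpr hne
    simp [List.length_append]; omega
  exact main x _ [] hbd hlt

theorem find7 (l : List (List Char)) (c0 c1 c2 c3 c4 c5 c6 : List Char) :
    List.find? (fun c => decide (c ∈ l)) [c0,c1,c2,c3,c4,c5,c6] =
      (if c0 ∈ l then some c0 else if c1 ∈ l then some c1 else if c2 ∈ l then some c2
       else if c3 ∈ l then some c3 else if c4 ∈ l then some c4 else if c5 ∈ l then some c5
       else if c6 ∈ l then some c6 else none) := by
  by_cases h0 : c0 ∈ l <;> by_cases h1 : c1 ∈ l <;> by_cases h2 : c2 ∈ l <;>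
    by_cases h3 : c3 ∈ l <;> by_cases h4 : c4 ∈ l <;> by_cases h5 : c5 ∈ l <;>
    by_cases h6 : c6 ∈ l <;> simp [List.find?_cons, h0, h1, h2, h3, h4, h5, h6]

theorem efGet?_none {d : PySem.Dict (List Char) Nat} {x : List Char}
    (h : d.contains x = false) : d.get? x = none := by
  cases hx : d.get? x with
  | none => rfl
  | some v => rw [PySem.Dict.contains_eq_isSome_get?, hx] at h; simp at h

theorem efRank_go (x : List Char) :
    ∀ (cs : List (List Char)) (n : Nat) (d : PySem.Dict (List Char) Nat),
      ((cs.zipIdx n).foldl (fun d p => if d.contains p.1 then d else d.insert p.1 p.2) d).get? x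
        = if d.contains x then d.get? x
          else if x ∈ cs then some (n + cs.idxOf x) else none := by
  intro cs
  induction cs with
  | nil =>
    intro n d
    simp only [List.zipIdx_nil, List.foldl_nil, List.not_mem_nil, if_false]
    by_cases hc : d.contains x = true
    · rw [if_pos hc]
    · rw [if_neg hc, efGet?_none (Bool.not_eq_true _ ▸ hc)]
  | cons c cs' ih =>
    intro n d
    rw [List.zipIdx_cons, List.foldl_cons]
    by_cases hc : d.contains c = true
    · simp only [hc, if_true]
      rw [ih]
      by_cases hx : x = c
      · subst hx; simp [hc]
      · have hcx : (c == x) = false := beq_eq_false_iff_ne.mpr (Ne.symm hx)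
        by_cases hm : x ∈ cs'
        · simp [hx, hm, List.idxOf_cons, hcx]; split_ifs <;> [rfl; exact congrArg some (by omega)]
        · simp [hx, hm, List.mem_cons]
    · simp only [hc, Bool.false_eq_true, if_false]
      rw [ih]
      by_cases hx : x = c
      · subst hx
        have hcf : d.contains x = false := Bool.not_eq_true _ ▸ hc
        simp [PySem.Dict.contains_eq_isSome_get?, PySem.Dict.get?_insert_self,
          efGet?_none hcf, List.idxOf_cons]
      · have hcont : (d.insert c n).contains x = d.contains x := by
          rw [PySem.Dict.contains_eq_isSome_get?, PySem.Dict.contains_eq_isSome_get?,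
            PySem.Dict.get?_insert_of_ne d n hx]
        rw [hcont, PySem.Dict.get?_insert_of_ne d n hx]
        have hcx : (c == x) = false := beq_eq_false_iff_ne.mpr (Ne.symm hx)
        by_cases hm : x ∈ cs'
        · simp [hx, hm, List.idxOf_cons, hcx]; split_ifs <;> [rfl; exact congrArg some (by omega)]
        · simp [hx, hm, List.mem_cons]

theorem efRank_get (cands : List (List Char)) (x : List Char) :
    (efRank cands).get? x = if x ∈ cands then some (cands.idxOf x) else none := by
  rw [efRank]
  have : cands.zipIdx = cands.zipIdx 0 := rfl
  rw [this, efRank_go]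
  simp [pysem, PySem.Dict.empty]

def efG (cands : List (List Char)) (x : List Char) : Nat :=
  ((efRank cands).get? x).getD cands.length

def efMin (cands : List (List Char)) (l : List (List Char)) (b0 : Nat) : Nat :=
  l.foldl (fun a x => min a (efG cands x)) b0

theorem efR1 {cands : List (List Char)} {x : List Char} {r : Nat}
    (h : (efRank cands).get? x = some r) :
    r < cands.length ∧ cands[r]? = some x := by
  rw [efRank_get] at h
  by_cases hm : x ∈ cands
  · rw [if_pos hm] at h
    obtain rfl : List.idxOf x cands = r := by injection h
    have hlt := List.idxOf_lt_length_of_mem hm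
    exact ⟨hlt, by rw [List.getElem?_eq_getElem hlt, List.getElem_idxOf]⟩
  · rw [if_neg hm] at h; cases h

theorem efG_eq_of_get? {cands : List (List Char)} {x : List Char} {r : Nat}
    (h : (efRank cands).get? x = some r) : efG cands x = r := by
  rw [efG, h]; rfl

theorem efMin_le (cands : List (List Char)) :
    ∀ (l : List (List Char)) (b0 : Nat), efMin cands l b0 ≤ b0 := by
  intro l
  induction l with
  | nil => intro b0; exact le_refl _
  | cons x l' ih =>
    intro b0
    exact le_trans (ih (min b0 (efG cands x))) (Nat.min_le_left _ _)

theorem efMin_le_g (cands : List (List Char)) :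
    ∀ (l : List (List Char)) (b0 : Nat) (x : List Char), x ∈ l →
      efMin cands l b0 ≤ efG cands x := by
  intro l
  induction l with
  | nil => intro b0 x hx; cases hx
  | cons y l' ih =>
    intro b0 x hx
    rcases List.mem_cons.mp hx with rfl | hx'
    · exact le_trans (efMin_le cands l' _) (Nat.min_le_right _ _)
    · exact ih _ x hx'

theorem efMin_cases (cands : List (List Char)) :
    ∀ (l : List (List Char)) (b0 : Nat),
      efMin cands l b0 = b0 ∨ ∃ x ∈ l, efMin cands l b0 = efG cands x := by
  intro l
  induction l with
  | nil => intro b0; exact Or.inl rfl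
  | cons y l' ih =>
    intro b0
    rcases ih (min b0 (efG cands y)) with h | ⟨x, hx, h⟩
    · rcases Nat.le_total b0 (efG cands y) with hle | hle
      · exact Or.inl (by rw [efMin, List.foldl_cons, ← efMin] at *; omega)
      · exact Or.inr ⟨y, List.mem_cons_self, by rw [efMin, List.foldl_cons, ← efMin] at *; omega⟩
    · exact Or.inr ⟨x, List.mem_cons_of_mem _ hx, h⟩

theorem efScan_shape (cands : List (List Char)) :
    ∀ (l : List (List Char)) (s : Option (List Char) × Nat),
      s.2 ≤ cands.length →
      s.1 = (if s.2 = cands.length then none else cands[s.2]?) →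
      l.foldl (fun s x =>
        match (efRank cands).get? x with
        | some r => if r < s.2 then (some x, r) else s
        | none => s) s
      = ((if efMin cands l s.2 = cands.length then none else cands[efMin cands l s.2]?),
         efMin cands l s.2) := by
  intro l
  induction l with
  | nil =>
    intro s h1 h2
    simp only [List.foldl_nil, efMin]
    exact Prod.ext h2 rfl
  | cons x l' ih =>
    intro s h1 h2
    rw [List.foldl_cons]
    have hstep : efMin cands (x :: l') s.2 = efMin cands l' (min s.2 (efG cands x)) := by
      rw [efMin, List.foldl_cons, ← efMin]
    rw [hstep]
    cases hgx : (efRank cands).get? x with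
    | none =>
      have hg : efG cands x = cands.length := by rw [efG, hgx]; rfl
      have hmin : min s.2 (efG cands x) = s.2 := by rw [hg]; omega
      simpa only [hmin] using ih s h1 h2
    | some r =>
      obtain ⟨hr, hxr⟩ := efR1 hgx
      have hg : efG cands x = r := efG_eq_of_get? hgx
      by_cases hlt : r < s.2
      · have hmin : min s.2 (efG cands x) = r := by rw [hg]; omega
        rw [hmin]
        simpa only [if_pos hlt] using ih (some x, r) (le_of_lt hr)
          (by simp only [if_neg (Nat.ne_of_lt hr)]; exact hxr.symm)
      · have hmin : min s.2 (efG cands x) = s.2 := by rw [hg]; omega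
        rw [hmin]
        simpa only [if_neg hlt] using ih s h1 h2

theorem efIdxOf_le (a : List Char) :
    ∀ (l : List (List Char)) (i : Nat) (h : i < l.length), l[i] = a → l.idxOf a ≤ i := by
  intro l
  induction l with
  | nil => intro i h; cases (by simpa using h : False)
  | cons b t ih =>
    intro i h he
    cases i with
    | zero => simp at he; simp [List.idxOf_cons, he]
    | succ j =>
      rw [List.idxOf_cons]
      cases hba : b == a with
      | true => simp
      | false =>
        simp only [Bool.cond_false]
        have := ih j (by simpa using h) (by simpa using he)
        omega


theorem efScan_eq_find (cands l : List (List Char)) :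
    (efScan (efRank cands) cands.length l).1 = cands.find? (fun c => decide (c ∈ l)) := by
  rw [efScan, efScan_shape cands l (none, cands.length) (le_refl _) (by simp)]
  set m := efMin cands l cands.length with hm
  cases hF : cands.find? (fun c => decide (c ∈ l)) with
  | none =>
    have hall := List.find?_eq_none.mp hF
    have : m = cands.length := by
      rcases efMin_cases cands l cands.length with h | ⟨x, hx, h⟩
      · exact h
      · cases hgx : (efRank cands).get? x with
        | none => rw [hm, h, efG, hgx]; rfl
        | some r =>
          obtain ⟨hr, hxr⟩ := efR1 hgx
          have hxc : x ∈ cands := List.mem_of_getElem? hxr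
          exact absurd (by simpa using hx) (by simpa using hall x hxc)
    simp [this]
  | some c =>
    obtain ⟨hpc, i0, hi0, hci, hmin0⟩ := List.find?_eq_some_iff_getElem.mp hF
    have hcl : c ∈ l := by simpa using hpc
    have hcc : c ∈ cands := hci ▸ List.getElem_mem hi0
    have hgc : efG cands c = List.idxOf c cands := by
      rw [efG, efRank_get, if_pos hcc]; rfl
    have hmle : m ≤ i0 := by
      have h1 : m ≤ efG cands c := efMin_le_g cands l cands.length c hcl
      have h2 : List.idxOf c cands ≤ i0 := efIdxOf_le c cands i0 hi0 hci
      omega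
    have hmlt : m < cands.length := lt_of_le_of_lt hmle hi0
    have hge : i0 ≤ m := by
      rcases efMin_cases cands l cands.length with h | ⟨x, hx, h⟩
      · omega
      · rw [← hm] at h
        cases hgx : (efRank cands).get? x with
        | none => rw [h, efG, hgx] at hmlt; simp at hmlt
        | some r =>
          have hgr : efG cands x = r := efG_eq_of_get? hgx
          obtain ⟨hr, hxr⟩ := efR1 hgx
          have hrm : m = r := by rw [h, hgr]
          by_contra hlt
          rw [not_le] at hlt
          have hltr : r < i0 := hrm ▸ hlt
          have hnp := hmin0 r hltr
          have hcx : cands[r]'hr = x := by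
            have h5 : cands[r]? = some (cands[r]'hr) := List.getElem?_eq_getElem hr
            rw [hxr] at h5
            injection h5 with h6; exact h6.symm
          rw [hcx] at hnp
          simp [hx] at hnp
    have hmi : m = i0 := le_antisymm hmle hge
    rw [if_neg (Nat.ne_of_lt hmlt), hmi, List.getElem?_eq_getElem hi0, hci]

theorem efA_eq_find (e : List Char) (l : List (List Char))
    (h1 : PySem.Chars.isIn "(LR)".toList
      (PySem.Chars.replace (PySem.Chars.replace (PySem.Chars.replace (PySem.Chars.replace e " oxide".toList []) "(LR)".toList []) "(MR)".toList []) "(HR)".toList []) = false)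
    (h2 : PySem.Chars.isIn "(MR)".toList
      (PySem.Chars.replace (PySem.Chars.replace (PySem.Chars.replace (PySem.Chars.replace e " oxide".toList []) "(LR)".toList []) "(MR)".toList []) "(HR)".toList []) = false)
    (h3 : PySem.Chars.isIn "(HR)".toList
      (PySem.Chars.replace (PySem.Chars.replace (PySem.Chars.replace (PySem.Chars.replace e " oxide".toList []) "(LR)".toList []) "(MR)".toList []) "(HR)".toList []) = false) :
    efACore e l = (efCandidates e).find? (fun c => decide (c ∈ l)) := by
  set b2 := PySem.Chars.replace (PySem.Chars.replace (PySem.Chars.replace (PySem.Chars.replace e " oxide".toList []) "(LR)".toList []) "(MR)".toList []) "(HR)".toList [] with hb2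
  have hLR := (PySem.Chars.isIn_eq_false_iff _ _).mp h1
  have hMR := (PySem.Chars.isIn_eq_false_iff _ _).mp h2
  have hHR := (PySem.Chars.isIn_eq_false_iff _ _).mp h3
  have r1 : PySem.Chars.replace (b2 ++ "(LR)".toList) "(LR)".toList [] = b2 :=
    efReplace_append_self _ _ (by decide) (by decide) hLR
  have r2 : PySem.Chars.replace (b2 ++ "(MR)".toList) "(MR)".toList [] = b2 :=
    efReplace_append_self _ _ (by decide) (by decide) hMR
  have r3 : PySem.Chars.replace (b2 ++ "(HR)".toList) "(HR)".toList [] = b2 :=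
    efReplace_append_self _ _ (by decide) (by decide) hHR
  rw [efACore, efCandidates, find7]
  simp only [← hb2, r1, r2, r3]


-- ===== VERDICT (by name: the statement is the Claim_ definition above) =====
theorem element_formater_spec : Claim_equal_element_formater := by
  intro elem lst _ hpre
  obtain ⟨h1, h2, h3⟩ := hpre
  unfold Spec_element_formater element_formater element_formater_alt
  rw [efA_eq_find elem.toList _ h1 h2 h3]
  exact congrArg (Option.map String.ofList) (efScan_eq_find _ _).symm
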